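-- pv_equiv track=rewrite | github.com/TimeB1729/codeforces | educational round 180 (div 2)/pC.py | ourfunc
-- ===== SOURCE A (Python) =====
-- def ourfunc(t, test_cases):
--     results=[]
--     for case in test_cases:
--         n,a = case
--         ans = 0
--         for i in range(n):
--             for j in range(i):
--                 x = max(a[n - 1], 2 * a[i]) - a[i] - a[j]
--                 left, right = 0, j
--                 while left < right:
--                     mid = (left + right) // 2
--                     if a[mid] <= x:
--                         left = mid + 1
--                     else:
--                         right = mid
--
--                 k = left
--                 ans += j - k
--
--         results.append(ans)
--     return results
-- ===== SOURCE B (Python) =====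
-- # B: same per-pair counting, but decomposed idiomatically: a recursive bisect
-- # helper plus sum-comprehensions instead of A's hand-rolled while loop and
-- # nested accumulator loops.  (A never sorts, so the exact binary-search value
-- # must be reproduced; same asymptotic cost.)
--
-- def _bisect_right(a, x, lo, hi):
--     if lo >= hi:
--         return lo
--     mid = lo + (hi - lo) // 2
--     if a[mid] <= x:
--         return _bisect_right(a, x, mid + 1, hi)
--     return _bisect_right(a, x, lo, mid)
--
--
-- def _case_count(n, a):
--     return sum(
--         j - _bisect_right(a, max(a[n - 1], 2 * a[i]) - a[i] - a[j], 0, j)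
--         for i in range(n)
--         for j in range(i)
--     )
--
--
-- def ourfunc(t, test_cases):
--     return [_case_count(n, a) for n, a in test_cases]
-- ===== Notes on version B (the rewrite author's own statement) =====
-- stated objective: idiomatic
-- what changed: A's hand-rolled iterative binary search and three nested accumulator loops are replaced by a recursive bisect helper and sum/list comprehensions over the flattened (i,j) pairs; since A never sorts the list, its exact binary-search value on arbitrary input can only be reproduced by the same search, so the hinted two-pointer scheme would not be exact and the cost stays O(n^2 log n) per case.
import Mathlib
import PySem

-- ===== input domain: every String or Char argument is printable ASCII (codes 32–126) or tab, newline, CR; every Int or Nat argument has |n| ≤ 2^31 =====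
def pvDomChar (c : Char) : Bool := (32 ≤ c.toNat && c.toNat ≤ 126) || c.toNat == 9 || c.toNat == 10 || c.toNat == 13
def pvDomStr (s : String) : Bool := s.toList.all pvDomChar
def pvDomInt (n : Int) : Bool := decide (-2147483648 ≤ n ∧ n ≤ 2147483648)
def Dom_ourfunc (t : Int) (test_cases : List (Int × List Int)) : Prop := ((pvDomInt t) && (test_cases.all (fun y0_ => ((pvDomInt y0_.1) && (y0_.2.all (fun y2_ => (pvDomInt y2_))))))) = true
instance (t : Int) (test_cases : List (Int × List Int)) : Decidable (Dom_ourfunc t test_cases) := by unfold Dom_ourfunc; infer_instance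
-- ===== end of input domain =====

-- B replaces A's hand-rolled while-loop binary search and nested accumulator
-- loops by a recursive bisect helper with map/sum comprehensions (same cost; idiomatic decomposition).


-- ===== PORT A =====
-- A's inner `while left < right` loop, step for step (a[mid] is in range on every
-- input admitted by Pre_ourfunc; pyGetD's default is never consulted there).
def pvWhileA (a : List Int) (x left right : Int) : Int :=
  if left < right then
    if PySem.List.pyGetD a (PySem.Int.floordiv (left + right) 2) 0 ≤ x then
      pvWhileA a x (PySem.Int.floordiv (left + right) 2 + 1) right
    else
      pvWhileA a x left (PySem.Int.floordiv (left + right) 2)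
  else left
termination_by (right - left).toNat
decreasing_by
  all_goals
    rw [PySem.Int.floordiv_eq_ediv_of_pos (by omega : (0:Int) < 2)] at *
    omega

def ourfunc (t : Int) (test_cases : List (Int × List Int)) : List Int :=
  test_cases.foldl (fun results case =>
    let n := case.1
    let a := case.2
    let ans := (PySem.List.pyRange 0 n 1).foldl (fun ans i =>
      (PySem.List.pyRange 0 i 1).foldl (fun ans j =>
        let x := max (PySem.List.pyGetD a (n - 1) 0) (2 * PySem.List.pyGetD a i 0)
                  - PySem.List.pyGetD a i 0 - PySem.List.pyGetD a j 0
        let k := pvWhileA a x 0 j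
        ans + (j - k)) ans) 0
    results ++ [ans]) []

-- ===== PORT B =====
-- B's recursive _bisect_right (branch order and midpoint formula as in Source B).
def pvBisectRight (a : List Int) (x lo hi : Int) : Int :=
  if lo ≥ hi then lo
  else
    if PySem.List.pyGetD a (lo + PySem.Int.floordiv (hi - lo) 2) 0 ≤ x then
      pvBisectRight a x (lo + PySem.Int.floordiv (hi - lo) 2 + 1) hi
    else
      pvBisectRight a x lo (lo + PySem.Int.floordiv (hi - lo) 2)
termination_by (hi - lo).toNat
decreasing_by
  all_goals
    rw [PySem.Int.floordiv_eq_ediv_of_pos (by omega : (0:Int) < 2)] at *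
    omega

-- B's _case_count: sum over the flattened (i, j) comprehension.
def pvCaseCount (n : Int) (a : List Int) : Int :=
  ((PySem.List.pyRange 0 n 1).flatMap (fun i =>
    (PySem.List.pyRange 0 i 1).map (fun j =>
      j - pvBisectRight a
            (max (PySem.List.pyGetD a (n - 1) 0) (2 * PySem.List.pyGetD a i 0)
              - PySem.List.pyGetD a i 0 - PySem.List.pyGetD a j 0) 0 j))).sum

def ourfunc_alt (t : Int) (test_cases : List (Int × List Int)) : List Int :=
  test_cases.map (fun case => pvCaseCount case.1 case.2)

-- ===== PRECONDITION & SPEC =====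
-- Pre_ excludes exactly the inputs on which Python A raises IndexError: a case
-- with n ≥ 2 and n > len(a) reaches a[n-1] out of range (for n ≤ 1 the inner
-- loops never index the list, so A returns normally even if n > len(a)).
def Pre_ourfunc (t : Int) (test_cases : List (Int × List Int)) : Prop :=
  ∀ c ∈ test_cases, c.1 < 2 ∨ c.1 ≤ (c.2.length : Int)
instance (t : Int) (test_cases : List (Int × List Int)) : Decidable (Pre_ourfunc t test_cases) := by unfold Pre_ourfunc; infer_instance

def pvWitness_ourfunc : Int × (List (Int × List Int)) := (1, [(2, [1, 2]), (1, []), (3, [5, -1, 4])])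

def Spec_ourfunc (t : Int) (test_cases : List (Int × List Int)) (out : List Int) : Prop := out = ourfunc_alt t test_cases
instance (t : Int) (test_cases : List (Int × List Int)) (out : List Int) : Decidable (Spec_ourfunc t test_cases out) := by unfold Spec_ourfunc; infer_instance

-- ===== CLAIM (what is proved, stated in full; the proofs are below) =====
def Claim_equal_ourfunc : Prop := ∀ (t : Int) (test_cases : List (Int × List Int)), Dom_ourfunc t test_cases → Pre_ourfunc t test_cases → Spec_ourfunc t test_cases (ourfunc t test_cases)

-- ===== LEMMAS AND PROOFS =====

-- The two midpoint formulas coincide.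
lemma pvMid_eq (lo hi : Int) :
    lo + PySem.Int.floordiv (hi - lo) 2 = PySem.Int.floordiv (lo + hi) 2 := by
  rw [PySem.Int.floordiv_eq_ediv_of_pos (by omega : (0:Int) < 2),
      PySem.Int.floordiv_eq_ediv_of_pos (by omega : (0:Int) < 2)]
  omega

-- A's while loop computes exactly B's recursive bisect.
lemma pvWhileA_eq_bisect (a : List Int) (x lo hi : Int) :
    pvWhileA a x lo hi = pvBisectRight a x lo hi := by
  fun_induction pvWhileA a x lo hi with
  | case1 lo hi hlt hle ih =>
      rw [pvBisectRight]
      simp only [pvMid_eq] at *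
      rw [if_neg (by omega), if_pos hle]
      exact ih
  | case2 lo hi hlt hle ih =>
      rw [pvBisectRight]
      simp only [pvMid_eq] at *
      rw [if_neg (by omega), if_neg hle]
      exact ih
  | case3 lo hi hlt =>
      rw [pvBisectRight, if_pos (by omega)]

-- Summing over the flattened pair list equals summing the per-i sums.
lemma pvSum_flatMap (f : Int → List Int) (l : List Int) :
    (l.flatMap f).sum = (l.map (fun i => (f i).sum)).sum := by
  induction l <;> simp [*]

-- A's nested accumulator loops over one case compute B's flattened sum.
lemma pvInner_eq (a : List Int) (g : Int → Int → Int) (l : List Int) (init : Int) :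
    l.foldl (fun ans i => (PySem.List.pyRange 0 i 1).foldl (fun ans j => ans + g i j) ans) init
      = init + (l.map (fun i => ((PySem.List.pyRange 0 i 1).map (g i)).sum)).sum := by
  induction l generalizing init with
  | nil => simp
  | cons i rest ih =>
      simp only [List.foldl_cons, List.map_cons, List.sum_cons,
        PySem.List.foldl_add]
      ring

lemma pvCase_eq (n : Int) (a : List Int) :
    (PySem.List.pyRange 0 n 1).foldl (fun ans i =>
      (PySem.List.pyRange 0 i 1).foldl (fun ans j =>
        ans + (j - pvWhileA a
          (max (PySem.List.pyGetD a (n - 1) 0) (2 * PySem.List.pyGetD a i 0)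
            - PySem.List.pyGetD a i 0 - PySem.List.pyGetD a j 0) 0 j)) ans) 0
      = pvCaseCount n a := by
  rw [pvInner_eq a (fun i j => j - pvWhileA a
      (max (PySem.List.pyGetD a (n - 1) 0) (2 * PySem.List.pyGetD a i 0)
        - PySem.List.pyGetD a i 0 - PySem.List.pyGetD a j 0) 0 j)]
  simp only [pvCaseCount, pvWhileA_eq_bisect, pvSum_flatMap, zero_add]

-- Peeling the per-case foldl step off A's outer loop, with a general accumulator.
lemma pvFold_eq (tcs : List (Int × List Int)) (acc : List Int) :
    tcs.foldl (fun results case =>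
      let n := case.1
      let a := case.2
      let ans := (PySem.List.pyRange 0 n 1).foldl (fun ans i =>
        (PySem.List.pyRange 0 i 1).foldl (fun ans j =>
          let x := max (PySem.List.pyGetD a (n - 1) 0) (2 * PySem.List.pyGetD a i 0)
                    - PySem.List.pyGetD a i 0 - PySem.List.pyGetD a j 0
          let k := pvWhileA a x 0 j
          ans + (j - k)) ans) 0
      results ++ [ans]) acc
    = acc ++ tcs.map (fun case => pvCaseCount case.1 case.2) := by
  induction tcs generalizing acc with
  | nil => simp
  | cons c rest ih =>
      simp only [List.foldl_cons, List.map_cons]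
      rw [ih]
      rw [pvCase_eq]
      simp

-- ===== VERDICT (by name: the statement is the Claim_ definition above) =====
theorem ourfunc_spec : Claim_equal_ourfunc := by
  intro t tcs _ _
  unfold Spec_ourfunc ourfunc ourfunc_alt
  rw [pvFold_eq]
  simp
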